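-- pv_equiv track=rewrite | github.com/alstjrwjd99/BaekJun | 프로그래머스/4/214290. 경사로의 개수/경사로의 개수.py | solution
-- ===== SOURCE A (Python) =====
-- MOD = 1_000_000_007
--
-- def solution(grid, d, k):
--     n = len(grid)
--     m = len(grid[0])
--     N = n * m
--
--     def idx(y, x): return y * m + x
--
--     # 경사 s에 대한 전이행렬 A(s) (N×N)
--     def build_adj_for_slope(s):
--         A = [[0]*N for _ in range(N)]
--         for y in range(n):
--             for x in range(m):
--                 u = idx(y, x)
--                 h = grid[y][x]
--                 for dy, dx in ((1,0),(-1,0),(0,1),(0,-1)):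
--                     ny, nx = y+dy, x+dx
--                     if 0 <= ny < n and 0 <= nx < m:
--                         v = idx(ny, nx)
--                         if grid[ny][nx] - h == s:
--                             A[u][v] = 1
--         return A
--
--     def mat_mul(A, B):
--         # 표준 O(N^3) 곱. N<=64라 충분함.
--         N = len(A)
--         C = [[0]*N for _ in range(N)]
--         # 약간의 캐시 최적화
--         for i in range(N):
--             Ai = A[i]
--             Ci = C[i]
--             for k_ in range(N):
--                 aik = Ai[k_]
--                 if aik:
--                     Bk = B[k_]
--                     for j in range(N):
--                         if Bk[j]:
--                             Ci[j] = (Ci[j] + aik * Bk[j]) % MOD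
--         return C
--
--     def mat_pow(M, e):
--         # 빠른 거듭제곱
--         N = len(M)
--         R = [[0]*N for _ in range(N)]
--         for i in range(N):
--             R[i][i] = 1
--         base = M
--         while e > 0:
--             if e & 1:
--                 R = mat_mul(R, base)
--             base = mat_mul(base, base)
--             e >>= 1
--         return R
--
--     # d 각 원소에 대해 전이행렬 만들고 한 바퀴 M 계산
--     # M = A(d0) * A(d1) * ... * A(dL-1)
--     L = len(d)
--     # 첫 행렬
--     M = build_adj_for_slope(d[0])
--     for t in range(1, L):
--         At = build_adj_for_slope(d[t])
--         M = mat_mul(M, At)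
--
--     # k바퀴
--     Mk = mat_pow(M, k)
--
--     # 모든 시작/끝 허용 → Mk 모든 원소 합
--     ans = 0
--     for i in range(N):
--         row = Mk[i]
--         # 파이썬 sum은 빠름
--         ans = (ans + sum(row)) % MOD
--     return ans
-- ===== SOURCE B (Python) =====
-- MOD = 1_000_000_007
--
-- def solution(grid, d, k):
--     n = len(grid)
--     m = len(grid[0])
--     N = n * m
--
--     def idx(y, x): return y * m + x
--
--     # adjacency matrix for slope s
--     def build_adj_for_slope(s):
--         A = [[0]*N for _ in range(N)]
--         for y in range(n):
--             for x in range(m):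
--                 u = idx(y, x)
--                 h = grid[y][x]
--                 for dy, dx in ((1,0),(-1,0),(0,1),(0,-1)):
--                     ny, nx = y+dy, x+dx
--                     if 0 <= ny < n and 0 <= nx < m:
--                         v = idx(ny, nx)
--                         if grid[ny][nx] - h == s:
--                             A[u][v] = 1
--         return A
--
--     # plain comprehension-style O(N^3) multiply, no zero-skip bookkeeping
--     def mul(A, B):
--         N_ = len(A)
--         return [[sum(A[i][t] * B[t][j] for t in range(N_)) % MOD
--                  for j in range(N_)]
--                 for i in range(N_)]
--
--     M = build_adj_for_slope(d[0])
--     for t in range(1, len(d)):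
--         M = mul(M, build_adj_for_slope(d[t]))
--
--     # recursive divide-and-conquer power instead of the LSB while-loop
--     def power(e):
--         if e <= 0:
--             return [[1 if i == j else 0 for j in range(len(M))] for i in range(len(M))]
--         H = power(e // 2)
--         S = mul(H, H)
--         return mul(S, M) if e % 2 else S
--
--     P = power(k)
--     return sum(sum(row) for row in P) % MOD
-- ===== Notes on version B (the rewrite author's own statement) =====
-- stated objective: alternative
-- what changed: Replaces the iterative LSB-first while-loop exponentiation by a recursive divide-and-conquer power (square the half-power, multiply by M once when odd), the zero-skipping in-place accumulation matrix multiply by a plain comprehension multiply, and the row-by-row mod-accumulating final sum by one total sum reduced mod once.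
import Mathlib
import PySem

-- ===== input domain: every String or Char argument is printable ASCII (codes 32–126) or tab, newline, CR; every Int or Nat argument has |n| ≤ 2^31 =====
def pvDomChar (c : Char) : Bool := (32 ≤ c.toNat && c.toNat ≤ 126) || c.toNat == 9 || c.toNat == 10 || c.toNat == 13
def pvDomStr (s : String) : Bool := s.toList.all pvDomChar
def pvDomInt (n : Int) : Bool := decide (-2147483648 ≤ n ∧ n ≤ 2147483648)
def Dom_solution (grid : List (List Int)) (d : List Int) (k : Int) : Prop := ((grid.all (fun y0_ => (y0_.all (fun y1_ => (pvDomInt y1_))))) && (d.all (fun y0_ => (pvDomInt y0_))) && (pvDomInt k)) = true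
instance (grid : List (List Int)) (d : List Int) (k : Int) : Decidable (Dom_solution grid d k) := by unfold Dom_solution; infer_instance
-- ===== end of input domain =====

-- B replaces A's LSB while-loop exponentiation by a recursive divide-and-conquer power, A's
-- zero-skipping in-place matrix multiply by a plain comprehension multiply, and the row-by-row
-- mod-accumulating final sum by one total sum; same asymptotic cost (objective: alternative).

def pvMOD : Int := 1000000007

-- grid[y][x] (read only where the Python reads it; in range under Pre_)
def pvCell (grid : List (List Int)) (y x : Int) : Int :=
  PySem.List.pyGetD (PySem.List.pyGetD grid y []) x 0

-- ===== PORT A =====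
-- build_adj_for_slope (identical text in Source A and Source B, hence one shared helper)
def pvBuildAdj (grid : List (List Int)) (n m N s : Int) : List (List Int) :=
  (PySem.List.pyRange 0 n 1).foldl (fun A y =>
    (PySem.List.pyRange 0 m 1).foldl (fun A x =>
      let u := y * m + x
      let h := pvCell grid y x
      ([((1:Int),(0:Int)), (-1,0), (0,1), (0,-1)]).foldl (fun A dd =>
        let ny := y + dd.1
        let nx := x + dd.2
        if 0 ≤ ny ∧ ny < n ∧ 0 ≤ nx ∧ nx < m then
          let v := ny * m + nx
          if pvCell grid ny nx - h = s then
            PySem.List.pySetD A u (PySem.List.pySetD (PySem.List.pyGetD A u []) v 1)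
          else A
        else A) A) A)
    (List.replicate N.toNat (List.replicate N.toNat 0))

-- A's mat_mul: zero matrix mutated row by row, with the aik/Bk[j] zero skips
def pvMatMul (A B : List (List Int)) : List (List Int) :=
  let N : Int := PySem.List.len A
  (PySem.List.pyRange 0 N 1).map (fun i =>
    let Ai := PySem.List.pyGetD A i []
    (PySem.List.pyRange 0 N 1).foldl (fun Ci k_ =>
      let aik := PySem.List.pyGetD Ai k_ 0
      if aik ≠ 0 then
        let Bk := PySem.List.pyGetD B k_ []
        (PySem.List.pyRange 0 N 1).foldl (fun Ci j =>
          let bkj := PySem.List.pyGetD Bk j 0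
          if bkj ≠ 0 then
            PySem.List.pySetD Ci j (PySem.Int.mod (PySem.List.pyGetD Ci j 0 + aik * bkj) pvMOD)
          else Ci) Ci
      else Ci) (List.replicate N.toNat 0))

-- A's mat_pow while-loop (e & 1 is PySem.Int.band, e >>= 1 is floor division by 2: exact)
def pvPowLoop (R base : List (List Int)) (e : Int) : List (List Int) :=
  if 0 < e then
    pvPowLoop (if PySem.Int.band e 1 = 1 then pvMatMul R base else R)
              (pvMatMul base base) (PySem.Int.floordiv e 2)
  else R
termination_by e.toNat
decreasing_by
  rw [PySem.Int.floordiv_eq_ediv_of_pos (by norm_num)]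
  omega

def pvMatPow (M : List (List Int)) (e : Int) : List (List Int) :=
  let N : Int := PySem.List.len M
  let R := (PySem.List.pyRange 0 N 1).foldl
      (fun R i => PySem.List.pySetD R i (PySem.List.pySetD (PySem.List.pyGetD R i []) i 1))
      (List.replicate N.toNat (List.replicate N.toNat 0))
  pvPowLoop R M e

def solution (grid : List (List Int)) (d : List Int) (k : Int) : Int :=
  let n : Int := PySem.List.len grid
  let m : Int := PySem.List.len (PySem.List.pyGetD grid 0 [])
  let N : Int := n * m
  let M0 := pvBuildAdj grid n m N (PySem.List.pyGetD d 0 0)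
  let M := (PySem.List.pyRange 1 (PySem.List.len d) 1).foldl
      (fun M t => pvMatMul M (pvBuildAdj grid n m N (PySem.List.pyGetD d t 0))) M0
  let Mk := pvMatPow M k
  Mk.foldl (fun ans row => PySem.Int.mod (ans + row.sum) pvMOD) 0

-- ===== PORT B =====
-- B's mul: plain comprehension multiply
def pvMatMulB (A B : List (List Int)) : List (List Int) :=
  let N : Int := PySem.List.len A
  (PySem.List.pyRange 0 N 1).map (fun i =>
    (PySem.List.pyRange 0 N 1).map (fun j =>
      PySem.Int.mod (((PySem.List.pyRange 0 N 1).map (fun t =>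
          PySem.List.pyGetD (PySem.List.pyGetD A i []) t 0 *
          PySem.List.pyGetD (PySem.List.pyGetD B t []) j 0)).sum) pvMOD))

def pvIdMat (N : Int) : List (List Int) :=
  (PySem.List.pyRange 0 N 1).map (fun i =>
    (PySem.List.pyRange 0 N 1).map (fun j => if i = j then (1:Int) else 0))

-- B's recursive divide-and-conquer power
def pvPowRec (M : List (List Int)) (e : Int) : List (List Int) :=
  if e ≤ 0 then pvIdMat (PySem.List.len M)
  else
    let H := pvPowRec M (PySem.Int.floordiv e 2)
    let S := pvMatMulB H H
    if PySem.Int.mod e 2 ≠ 0 then pvMatMulB S M else S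
termination_by e.toNat
decreasing_by
  rw [PySem.Int.floordiv_eq_ediv_of_pos (by norm_num)]
  omega

def solution_alt (grid : List (List Int)) (d : List Int) (k : Int) : Int :=
  let n : Int := PySem.List.len grid
  let m : Int := PySem.List.len (PySem.List.pyGetD grid 0 [])
  let N : Int := n * m
  let M0 := pvBuildAdj grid n m N (PySem.List.pyGetD d 0 0)
  let M := (PySem.List.pyRange 1 (PySem.List.len d) 1).foldl
      (fun M t => pvMatMulB M (pvBuildAdj grid n m N (PySem.List.pyGetD d t 0))) M0
  let P := pvPowRec M k
  PySem.Int.mod ((P.map (fun row => row.sum)).sum) pvMOD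

-- ===== PRECONDITION & SPEC =====
-- Pre_ excludes exactly the inputs where the Python A raises IndexError: an empty grid
-- (grid[0]), an empty d (d[0]), or a grid row shorter than the first row (grid[y][x]).
def Pre_solution (grid : List (List Int)) (d : List Int) (k : Int) : Prop :=
  grid ≠ [] ∧ d ≠ [] ∧ ∀ row ∈ grid, (grid.getD 0 []).length ≤ row.length
instance (grid : List (List Int)) (d : List Int) (k : Int) : Decidable (Pre_solution grid d k) := by
  unfold Pre_solution; infer_instance

def pvWitness_solution : List (List Int) × List Int × Int := ([[0, 1]], [1, -1], 3)

def Spec_solution (grid : List (List Int)) (d : List Int) (k : Int) (out : Int) : Prop := out = solution_alt grid d k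
instance (grid : List (List Int)) (d : List Int) (k : Int) (out : Int) : Decidable (Spec_solution grid d k out) := by unfold Spec_solution; infer_instance

-- ===== CLAIM (what is proved, stated in full; the proofs are below) =====
def Claim_equal_solution : Prop := ∀ (grid : List (List Int)) (d : List Int) (k : Int), Dom_solution grid d k → Pre_solution grid d k → Spec_solution grid d k (solution grid d k)

-- ===== LEMMAS AND PROOFS =====

-- proof-side helpers

lemma pvSet_natCast {α : Type} (xs : List α) (k : Nat) (v : α) :
    PySem.List.pySetD xs (k : Int) v = xs.set k v := by
  by_cases h : k < xs.length
  · simp [PySem.List.pySetD, PySem.List.pySet?, PySem.List.pyIdx?, h]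
  · rw [List.set_eq_of_length_le (by omega)]
    simp [PySem.List.pySetD, PySem.List.pySet?, PySem.List.pyIdx?, h]

lemma pvSet_inrange {α : Type} (xs : List α) (i : Int) (v : α)
    (h0 : 0 ≤ i) (h1 : i < (xs.length : Int)) :
    PySem.List.pySetD xs i v = xs.set i.toNat v := by
  simp [PySem.List.pySetD, PySem.List.pySet?, PySem.List.pyIdx?, h0, h1]

lemma pvSetSelf {α : Type} (l : List α) (j : Nat) (d : α) :
    l.set j (l.getD j d) = l := by
  by_cases h : j < l.length
  · rw [List.getD_eq_getElem l d h, List.set_getElem_self]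
  · exact List.set_eq_of_length_le (by omega)

lemma pvFoldlInv {α β : Type} (P : α → Prop) (f : α → β → α) :
    ∀ (l : List β) (init : α), P init → (∀ a b, b ∈ l → P a → P (f a b)) →
      P (l.foldl f init)
  | [], init, h0, _ => h0
  | b :: l, init, h0, hs =>
    pvFoldlInv P f l (f init b) (hs init b (by simp) h0)
      (fun a b' hb' ha => hs a b' (by simp [hb']) ha)

lemma pvSetFold {α : Type} (dflt : α) (f : Nat → α → α) :
    ∀ (l : List α) (s : Nat) (pre : List α), pre.length = s →
      (List.range' s l.length).foldl (fun C j => C.set j (f j (C.getD j dflt))) (pre ++ l)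
        = pre ++ (List.range l.length).map (fun t => f (s + t) (l.getD t dflt)) := by
  intro l
  induction l with
  | nil => simp
  | cons x xs ih =>
    intro s pre hpre
    rw [List.length_cons, List.range'_succ, List.foldl_cons]
    have hget : (pre ++ x :: xs).getD s dflt = x := by
      rw [List.getD, List.getElem?_append_right (by omega)]
      simp [hpre]
    have hset : (pre ++ x :: xs).set s (f s x) = (pre ++ [f s x]) ++ xs := by
      rw [List.set_append]
      simp [hpre]
    rw [hget, hset]
    rw [ih (s + 1) (pre ++ [f s x]) (by simp [hpre])]
    simp only [List.range_succ_eq_map, List.map_cons, List.map_map]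
    simp only [List.append_assoc, List.cons_append, List.nil_append, List.getD_cons_zero]
    congr 1
    congr 1
    apply List.map_congr_left
    intro t _
    simp [Function.comp]
    congr 1
    omega

lemma pvSetFoldRange {α : Type} (dflt : α) (f : Nat → α → α) (l : List α) :
    (List.range l.length).foldl (fun C j => C.set j (f j (C.getD j dflt))) l
      = (List.range l.length).map (fun t => f t (l.getD t dflt)) := by
  have := pvSetFold dflt f l 0 [] rfl
  simpa [List.range_eq_range'] using this

lemma pvScalarFold (p : Int) (a b : Nat → Int) :
    ∀ (ks : List Nat) (x : Int),
      ks.foldl (fun c k => if a k ≠ 0 then (if b k ≠ 0 then (c + a k * b k) % p else c) else c)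
        (x % p)
        = (x + (ks.map (fun k => a k * b k)).sum) % p := by
  intro ks
  induction ks with
  | nil => intro x; simp
  | cons k ks ih =>
    intro x
    simp only [List.foldl_cons, List.map_cons, List.sum_cons]
    by_cases ha : a k = 0
    · simp only [ha, ne_eq, not_true_eq_false, if_false, zero_mul, zero_add]
      simpa using ih x
    · by_cases hb : b k = 0
      · simp only [ha, hb, ne_eq, not_false_eq_true, if_true, not_true_eq_false, if_false,
          mul_zero, add_zero]
        simpa using ih x
      · simp only [ha, hb, ne_eq, not_false_eq_true, if_true]
        rw [Int.emod_add_emod, ih (x + a k * b k)]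
        ring_nf
def pvE (X : List (List Int)) (i j : Nat) : Int := (X.getD i []).getD j 0
def pvS (A B : List (List Int)) (i j : Nat) : Int :=
  ((List.range A.length).map (fun t => pvE A i t * pvE B t j)).sum
def pvCanon (n : Nat) (f : Nat → Nat → Int) : List (List Int) :=
  (List.range n).map (fun i => (List.range n).map (fun j => f i j))

lemma pvFoldMapRange {β : Type} (n : Nat) (F : List Int → β → List Int) (h : β → Nat → Int → Int)
    (hF : ∀ (r : Nat → Int) (k : β), F ((List.range n).map r) k
        = (List.range n).map (fun j => h k j (r j))) :
    ∀ (ks : List β) (r : Nat → Int),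
      ks.foldl F ((List.range n).map r)
        = (List.range n).map (fun j => ks.foldl (fun c k => h k j c) (r j)) := by
  intro ks
  induction ks with
  | nil => intro r; rfl
  | cons k ks ih =>
    intro r
    simp only [List.foldl_cons]
    rw [hF r k, ih (fun j => h k j (r j))]

lemma pvMOD_pos : (0:Int) < pvMOD := by norm_num [pvMOD]

lemma pvMatMulB_canon (A B : List (List Int)) :
    pvMatMulB A B = pvCanon A.length (fun i j => pvS A B i j % pvMOD) := by
  simp only [pvMatMulB, pvCanon, PySem.List.len_eq, PySem.List.pyRange_zero_natCast,
    List.map_map]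
  apply List.map_congr_left
  intro i _
  apply List.map_congr_left
  intro j _
  simp only [Function.comp_def, PySem.List.pyGetD_natCast,
    PySem.Int.mod_eq_emod_of_pos pvMOD_pos, pvS, pvE]

lemma pvIdMat_canon (n : Nat) :
    pvIdMat (n : Int) = pvCanon n (fun i j => if i = j then 1 else 0) := by
  simp only [pvIdMat, pvCanon, PySem.List.pyRange_zero_natCast, List.map_map]
  apply List.map_congr_left
  intro i _
  apply List.map_congr_left
  intro j _
  simp [Function.comp, Nat.cast_inj]
lemma pvSetFoldRange' {α : Type} (dflt : α) (f : Nat → α → α) (l : List α) (n : Nat)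
    (h : l.length = n) :
    (List.range n).foldl (fun C j => C.set j (f j (C.getD j dflt))) l
      = (List.range n).map (fun t => f t (l.getD t dflt)) := by
  subst h
  exact pvSetFoldRange dflt f l

lemma pvScalarFold0 (p : Int) (a b : Nat → Int) (ks : List Nat) :
    ks.foldl (fun c k => if a k ≠ 0 then (if b k ≠ 0 then (c + a k * b k) % p else c) else c)
      (0:Int) = ((ks.map (fun k => a k * b k)).sum) % p := by
  have := pvScalarFold p a b ks 0
  rwa [Int.zero_emod, zero_add] at this

lemma pvMatMul_canon (A B : List (List Int)) :
    pvMatMul A B = pvCanon A.length (fun i j => pvS A B i j % pvMOD) := by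
  simp only [pvMatMul, PySem.List.len_eq, PySem.List.pyRange_zero_natCast, List.map_map,
    List.foldl_map, Int.toNat_natCast, PySem.List.pyGetD_natCast, pvCanon]
  apply List.map_congr_left
  intro i _
  simp only [Function.comp_apply, PySem.List.pyGetD_natCast,
    PySem.Int.mod_eq_emod_of_pos pvMOD_pos, pvSet_natCast]
  rw [show (List.replicate A.length (0:Int)) = (List.range A.length).map (fun _ => (0:Int)) by
    rw [List.map_const', List.length_range]]
  rw [pvFoldMapRange A.length _
    (fun k j c => if pvE A i k ≠ 0 then
      (if pvE B k j ≠ 0 then (c + pvE A i k * pvE B k j) % pvMOD else c) else c)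
    ?hF]
  · apply List.map_congr_left
    intro j _
    rw [pvScalarFold0 pvMOD (fun k => pvE A i k) (fun k => pvE B k j) (List.range A.length)]
    simp [pvS]
  · intro r k
    by_cases ha : pvE A i k ≠ 0
    · simp only [pvE] at ha ⊢
      rw [if_pos ha]
      simp only [ne_eq, ha, not_false_eq_true, if_true]
      have hstep : (fun (x : List Int) (y : Nat) =>
            if (B.getD k []).getD y 0 ≠ 0 then
              x.set y ((x.getD y 0 + (A.getD i []).getD k 0 * (B.getD k []).getD y 0) % pvMOD)
            else x)
          = fun x y => x.set y ((fun j c =>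
              if (B.getD k []).getD j 0 ≠ 0 then
                (c + (A.getD i []).getD k 0 * (B.getD k []).getD j 0) % pvMOD
              else c) y (x.getD y 0)) := by
        funext x y
        beta_reduce
        by_cases hb : (B.getD k []).getD y 0 ≠ 0
        · rw [if_pos hb, if_pos hb]
        · rw [if_neg hb, if_neg hb, pvSetSelf]
      rw [hstep]
      rw [pvSetFoldRange' 0 (fun j c =>
            if (B.getD k []).getD j 0 ≠ 0 then
              (c + (A.getD i []).getD k 0 * (B.getD k []).getD j 0) % pvMOD
            else c) (List.map r (List.range A.length)) A.length (by simp)]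
      apply List.map_congr_left
      intro t ht
      rw [PySem.List.getD_map_range r A.length t 0 (List.mem_range.mp ht)]
    · have ha' : (A.getD i []).getD k 0 = 0 := by
        simpa [pvE] using ha
      simp only [pvE, ne_eq, ha', not_true_eq_false, if_false]
lemma pvMatMul_eq (A B : List (List Int)) : pvMatMul A B = pvMatMulB A B := by
  rw [pvMatMul_canon, pvMatMulB_canon]

lemma pvCanon_length (n : Nat) (f : Nat → Nat → Int) : (pvCanon n f).length = n := by
  simp [pvCanon]

lemma pvE_canon (n : Nat) (f : Nat → Nat → Int) (i j : Nat) (hi : i < n) (hj : j < n) :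
    pvE (pvCanon n f) i j = f i j := by
  simp only [pvCanon, pvE]
  rw [PySem.List.getD_map_range _ n i [] hi, PySem.List.getD_map_range _ n j 0 hj]

def pvGood (n : Nat) (X : List (List Int)) : Prop :=
  X.length = n ∧ (∀ r ∈ X, r.length = n) ∧ ∀ r ∈ X, ∀ x ∈ r, 0 ≤ x ∧ x < pvMOD

lemma pvGood_canon (n : Nat) (f : Nat → Nat → Int)
    (hf : ∀ i j, i < n → j < n → 0 ≤ f i j ∧ f i j < pvMOD) : pvGood n (pvCanon n f) := by
  refine ⟨pvCanon_length n f, ?_, ?_⟩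
  · intro r hr
    simp only [pvCanon, List.mem_map] at hr
    obtain ⟨i, _, rfl⟩ := hr
    simp
  · intro r hr x hx
    simp only [pvCanon, List.mem_map] at hr
    obtain ⟨i, hi, rfl⟩ := hr
    simp only [List.mem_map] at hx
    obtain ⟨j, hj, rfl⟩ := hx
    exact hf i j (List.mem_range.mp hi) (List.mem_range.mp hj)

lemma pvGood_matMulB (n : Nat) (A B : List (List Int)) (h : A.length = n) :
    pvGood n (pvMatMulB A B) := by
  rw [pvMatMulB_canon, h]
  apply pvGood_canon
  intro i j _ _
  exact ⟨Int.emod_nonneg _ (by norm_num [pvMOD]), Int.emod_lt_of_pos _ pvMOD_pos⟩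

lemma pvGood_idMat (n : Nat) : pvGood n (pvIdMat (n : Int)) := by
  rw [pvIdMat_canon]
  apply pvGood_canon
  intro i j _ _
  split <;> norm_num [pvMOD]

lemma pvCanon_ext (n : Nat) (X : List (List Int)) (h1 : X.length = n)
    (h2 : ∀ r ∈ X, r.length = n) : pvCanon n (fun i j => pvE X i j) = X := by
  apply List.ext_getElem
  · simp [pvCanon, h1]
  · intro i hi hi'
    have hrow : X[i].length = n := h2 X[i] (List.getElem_mem hi')
    apply List.ext_getElem
    · simp [pvCanon, hrow]
    · intro j hj hj'
      have hin : i < n := by simpa [pvCanon] using hi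
      have hjn : j < n := by rwa [hrow] at hj'
      simp only [pvCanon, List.getElem_map, List.getElem_range]
      simp only [pvE]
      rw [List.getD_eq_getElem X [] (by omega), List.getD_eq_getElem _ 0 (by omega)]

lemma pvSumMulModL (n : Nat) (X c : Nat → Int) :
    (∑ k ∈ Finset.range n, (X k % pvMOD) * c k) % pvMOD
      = (∑ k ∈ Finset.range n, X k * c k) % pvMOD := by
  rw [Finset.sum_int_mod]
  rw [Finset.sum_congr rfl (fun k _ => by
    rw [Int.mul_emod, Int.emod_emod_of_dvd _ dvd_rfl, ← Int.mul_emod])]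
  rw [← Finset.sum_int_mod]

lemma pvSumMulModR (n : Nat) (a Y : Nat → Int) :
    (∑ k ∈ Finset.range n, a k * (Y k % pvMOD)) % pvMOD
      = (∑ k ∈ Finset.range n, a k * Y k) % pvMOD := by
  rw [Finset.sum_int_mod]
  rw [Finset.sum_congr rfl (fun k _ => by
    rw [Int.mul_emod, Int.emod_emod_of_dvd _ dvd_rfl, ← Int.mul_emod])]
  rw [← Finset.sum_int_mod]

lemma pvS_finset (A B : List (List Int)) (i j : Nat) :
    pvS A B i j = ∑ t ∈ Finset.range A.length, pvE A i t * pvE B t j := rfl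
lemma pvCanon_congr (n : Nat) (f g : Nat → Nat → Int)
    (h : ∀ i j, i < n → j < n → f i j = g i j) : pvCanon n f = pvCanon n g := by
  apply List.map_congr_left
  intro i hi
  apply List.map_congr_left
  intro j hj
  exact h i j (List.mem_range.mp hi) (List.mem_range.mp hj)

lemma pvGood_entry {n : Nat} {X : List (List Int)} (h : pvGood n X) {i j : Nat}
    (hi : i < n) (hj : j < n) : 0 ≤ pvE X i j ∧ pvE X i j < pvMOD := by
  obtain ⟨h1, h2, h3⟩ := h
  have hi' : i < X.length := by omega
  have hrow : X[i] ∈ X := List.getElem_mem hi'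
  have hlen : X[i].length = n := h2 _ hrow
  have hj' : j < X[i].length := by omega
  have : pvE X i j = X[i][j] := by
    simp only [pvE]
    rw [List.getD_eq_getElem X [] hi', List.getD_eq_getElem _ 0 hj']
  rw [this]
  exact h3 _ hrow _ (List.getElem_mem hj')

lemma pvMatMulB_length (A B : List (List Int)) : (pvMatMulB A B).length = A.length := by
  rw [pvMatMulB_canon]; exact pvCanon_length _ _

lemma pvIdMat_length (n : Nat) : (pvIdMat (n : Int)).length = n := by
  rw [pvIdMat_canon]; exact pvCanon_length _ _

lemma pvE_idMat (n i j : Nat) (hi : i < n) (hj : j < n) :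
    pvE (pvIdMat (n : Int)) i j = if i = j then 1 else 0 := by
  rw [pvIdMat_canon, pvE_canon _ _ _ _ hi hj]

lemma pvMulId (n : Nat) (X : List (List Int)) (h : pvGood n X) :
    pvMatMulB X (pvIdMat (n : Int)) = X := by
  rw [pvMatMulB_canon, h.1]
  conv_rhs => rw [← pvCanon_ext n X h.1 h.2.1]
  apply pvCanon_congr
  intro i j hi hj
  rw [pvS_finset, h.1]
  rw [Finset.sum_congr rfl (fun t ht => by
    rw [pvE_idMat n t j (List.mem_range.mp ht) hj])]
  simp only [mul_ite, mul_one, mul_zero]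
  rw [Finset.sum_ite_eq' (Finset.range n) j (fun t => pvE X i t)]
  simp only [Finset.mem_range, hj, if_true]
  exact Int.emod_eq_of_lt (pvGood_entry h hi hj).1 (pvGood_entry h hi hj).2

lemma pvIdMul (n : Nat) (X : List (List Int)) (h : pvGood n X) :
    pvMatMulB (pvIdMat (n : Int)) X = X := by
  rw [pvMatMulB_canon, pvIdMat_length]
  conv_rhs => rw [← pvCanon_ext n X h.1 h.2.1]
  apply pvCanon_congr
  intro i j hi hj
  rw [pvS_finset, pvIdMat_length]
  rw [Finset.sum_congr rfl (fun t ht => by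
    rw [pvE_idMat n i t hi (List.mem_range.mp ht)])]
  simp only [ite_mul, one_mul, zero_mul]
  rw [Finset.sum_ite_eq (Finset.range n) i (fun t => pvE X t j)]
  simp only [Finset.mem_range, hi, if_true]
  exact Int.emod_eq_of_lt (pvGood_entry h hi hj).1 (pvGood_entry h hi hj).2

lemma pvAssoc (n : Nat) (A B C : List (List Int)) (hA : A.length = n) (hB : B.length = n) :
    pvMatMulB (pvMatMulB A B) C = pvMatMulB A (pvMatMulB B C) := by
  conv_lhs => rw [pvMatMulB_canon (pvMatMulB A B) C]
  conv_rhs => rw [pvMatMulB_canon A (pvMatMulB B C)]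
  rw [pvMatMulB_length, hA]
  apply pvCanon_congr
  intro i j hi hj
  have hL : pvS (pvMatMulB A B) C i j
      = ∑ t ∈ Finset.range n, (pvS A B i t % pvMOD) * pvE C t j := by
    rw [pvS_finset, pvMatMulB_length, hA]
    exact Finset.sum_congr rfl (fun t ht => by
      rw [show pvE (pvMatMulB A B) i t = pvS A B i t % pvMOD by
        rw [pvMatMulB_canon, hA, pvE_canon _ _ _ _ hi (List.mem_range.mp ht)]])
  have hR : pvS A (pvMatMulB B C) i j
      = ∑ t ∈ Finset.range n, pvE A i t * (pvS B C t j % pvMOD) := by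
    rw [pvS_finset, hA]
    exact Finset.sum_congr rfl (fun t ht => by
      rw [show pvE (pvMatMulB B C) t j = pvS B C t j % pvMOD by
        rw [pvMatMulB_canon, hB, pvE_canon _ _ _ _ (List.mem_range.mp ht) hj]])
  rw [hL, hR, pvSumMulModL, pvSumMulModR]
  congr 1
  simp only [pvS_finset, hA, hB, Finset.sum_mul, Finset.mul_sum]
  rw [Finset.sum_comm]
  exact Finset.sum_congr rfl (fun l _ => Finset.sum_congr rfl (fun t _ => by ring)
    )
def pvNpow (M : List (List Int)) : Nat → List (List Int)
  | 0 => pvIdMat (PySem.List.len M)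
  | h + 1 => pvMatMulB (pvNpow M h) M

lemma pvLen_cast {n : Nat} {M : List (List Int)} (h : M.length = n) :
    PySem.List.len M = (n : Int) := by simp [PySem.List.len_eq, h]

lemma pvGood_npow {n : Nat} {M : List (List Int)} (h : pvGood n M) (e : Nat) :
    pvGood n (pvNpow M e) := by
  induction e with
  | zero => rw [pvNpow, pvLen_cast h.1]; exact pvGood_idMat n
  | succ e ih => exact pvGood_matMulB n _ _ ih.1

lemma pvNpow_add {n : Nat} {M : List (List Int)} (h : pvGood n M) (a b : Nat) :
    pvNpow M (a + b) = pvMatMulB (pvNpow M a) (pvNpow M b) := by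
  induction b with
  | zero =>
    rw [Nat.add_zero, pvNpow, pvLen_cast h.1, pvMulId n _ (pvGood_npow h a)]
  | succ b ih =>
    rw [show a + (b+1) = (a+b) + 1 by omega, pvNpow, ih, pvNpow]
    rw [pvAssoc n _ _ _ (pvGood_npow h a).1 (pvGood_npow h b).1]

lemma pvNpow_one {n : Nat} {M : List (List Int)} (h : pvGood n M) : pvNpow M 1 = M := by
  rw [pvNpow, pvNpow, pvLen_cast h.1, pvIdMul n M h]

lemma pvNpow_succ_left {n : Nat} {M : List (List Int)} (h : pvGood n M) (e : Nat) :
    pvMatMulB M (pvNpow M e) = pvNpow M (e + 1) := by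
  nth_rewrite 1 [show M = pvNpow M 1 from (pvNpow_one h).symm]
  rw [← pvNpow_add h 1 e, Nat.add_comm 1 e]

lemma pvNpow_double {n : Nat} {M : List (List Int)} (h : pvGood n M) (e : Nat) :
    pvNpow (pvMatMulB M M) e = pvNpow M (2 * e) := by
  induction e with
  | zero =>
    rw [pvNpow, pvNpow, pvLen_cast (pvMatMulB_length M M ▸ h.1), pvLen_cast h.1]
  | succ e ih =>
    rw [pvNpow, ih, show 2 * (e+1) = 2*e + 1 + 1 by omega, pvNpow, pvNpow]
    rw [← pvAssoc n _ _ _ (pvGood_npow h (2*e)).1 h.1]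
lemma pvPowLoop_eq {n : Nat} : ∀ (fuel : Nat) (e : Int), e.toNat ≤ fuel →
    ∀ (R base : List (List Int)), pvGood n R → pvGood n base →
      pvPowLoop R base e = pvMatMulB R (pvNpow base e.toNat) := by
  intro fuel
  induction fuel with
  | zero =>
    intro e he R base hR hbase
    rw [pvPowLoop]
    rw [if_neg (by omega : ¬ 0 < e), show e.toNat = 0 by omega, pvNpow,
      pvLen_cast hbase.1, pvMulId n R hR]
  | succ fuel ih =>
    intro e he R base hR hbase
    rw [pvPowLoop]
    by_cases h0 : 0 < e
    · rw [if_pos h0]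
      rw [PySem.Int.band_one, PySem.Int.mod_eq_emod_of_pos (by norm_num),
        PySem.Int.floordiv_eq_ediv_of_pos (by norm_num)]
      simp only [pvMatMul_eq]
      have hgb : pvGood n (pvMatMulB base base) := pvGood_matMulB n _ _ hbase.1
      have hdiv : (e / 2).toNat ≤ fuel := by omega
      rcases Int.emod_two_eq e with hpar | hpar
      · rw [hpar, if_neg (by norm_num)]
        rw [ih (e/2) hdiv R (pvMatMulB base base) hR hgb]
        rw [pvNpow_double hbase, show 2 * (e/2).toNat = e.toNat by omega]
      · rw [hpar, if_pos rfl]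
        rw [ih (e/2) hdiv (pvMatMulB R base) (pvMatMulB base base)
          (pvGood_matMulB n _ _ hR.1) hgb]
        rw [pvNpow_double hbase]
        rw [pvAssoc n R base _ hR.1 hbase.1]
        rw [pvNpow_succ_left hbase]
        rw [show 2 * (e/2).toNat + 1 = e.toNat by omega]
    · rw [if_neg h0, show e.toNat = 0 by omega, pvNpow, pvLen_cast hbase.1, pvMulId n R hR]
lemma pvPowRec_eq {n : Nat} : ∀ (fuel : Nat) (e : Int), e.toNat ≤ fuel →
    ∀ (M : List (List Int)), pvGood n M →
      pvPowRec M e = pvNpow M e.toNat := by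
  intro fuel
  induction fuel with
  | zero =>
    intro e he M hM
    rw [pvPowRec, if_pos (by omega : e ≤ 0), show e.toNat = 0 by omega, pvNpow]
  | succ fuel ih =>
    intro e he M hM
    rw [pvPowRec]
    by_cases h0 : e ≤ 0
    · rw [if_pos h0, show e.toNat = 0 by omega, pvNpow]
    · rw [if_neg h0]
      rw [PySem.Int.mod_eq_emod_of_pos (by norm_num),
        PySem.Int.floordiv_eq_ediv_of_pos (by norm_num)]
      have hdiv : (e / 2).toNat ≤ fuel := by omega
      rw [ih (e/2) hdiv M hM]
      set h := (e/2).toNat with hh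
      show (if e % 2 ≠ 0 then pvMatMulB (pvMatMulB (pvNpow M h) (pvNpow M h)) M
        else pvMatMulB (pvNpow M h) (pvNpow M h)) = pvNpow M e.toNat
      rw [show pvMatMulB (pvNpow M h) (pvNpow M h) = pvNpow M (h + h) from
        (pvNpow_add hM h h).symm]
      rcases Int.emod_two_eq e with hpar | hpar
      · rw [hpar, if_neg (by norm_num), show e.toNat = h + h by omega]
      · rw [hpar, if_pos (by norm_num)]
        rw [show pvMatMulB (pvNpow M (h+h)) M = pvNpow M (h+h+1) from rfl]
        rw [show e.toNat = h + h + 1 by omega]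
lemma pvIdBuild (n : Nat) :
    (PySem.List.pyRange 0 (n : Int) 1).foldl
      (fun R i => PySem.List.pySetD R i (PySem.List.pySetD (PySem.List.pyGetD R i []) i 1))
      (List.replicate n (List.replicate n (0:Int)))
    = pvIdMat (n : Int) := by
  rw [PySem.List.pyRange_zero_natCast, List.foldl_map]
  simp only [pvSet_natCast, PySem.List.pyGetD_natCast]
  rw [pvSetFoldRange' [] (fun i row => row.set i (1:Int))
    (List.replicate n (List.replicate n (0:Int))) n (by simp)]
  rw [pvIdMat_canon]
  apply List.map_congr_left
  intro t ht
  have htn : t < n := List.mem_range.mp ht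
  rw [List.getD_eq_getElem _ [] (by simpa using htn), List.getElem_replicate]
  apply List.ext_getElem (by simp)
  intro j hj hj'
  rw [List.getElem_set, List.getElem_replicate]
  simp only [List.getElem_map, List.getElem_range]
lemma pvMatPow_eq {n : Nat} (M : List (List Int)) (hM : pvGood n M) (e : Int) :
    pvMatPow M e = pvNpow M e.toNat := by
  simp only [pvMatPow]
  rw [pvLen_cast hM.1, Int.toNat_natCast, pvIdBuild n]
  rw [pvPowLoop_eq e.toNat e Nat.le.refl (pvIdMat (n:Int)) M (pvGood_idMat n) hM]
  exact pvIdMul n _ (pvGood_npow hM e.toNat)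

lemma pvGood_buildAdj (grid : List (List Int)) (n m : Int) (hn : 0 ≤ n) (hm : 0 ≤ m)
    (s : Int) : pvGood ((n*m).toNat) (pvBuildAdj grid n m (n*m) s) := by
  set N' := (n*m).toNat with hN'
  have hNm : ((N' : Nat) : Int) = n * m := Int.toNat_of_nonneg (mul_nonneg hn hm)
  set P : List (List Int) → Prop := fun X =>
    X.length = N' ∧ (∀ r ∈ X, r.length = N') ∧ ∀ r ∈ X, ∀ x ∈ r, x = 0 ∨ x = 1 with hP
  have hset : ∀ (X : List (List Int)) (u v : Int), 0 ≤ u → u < n*m → 0 ≤ v → v < n*m →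
      P X → P (PySem.List.pySetD X u
        (PySem.List.pySetD (PySem.List.pyGetD X u []) v 1)) := by
    intro X u v hu0 hu1 hv0 hv1 ⟨h1, h2, h3⟩
    have hulen : u < (X.length : Int) := by rw [h1]; omega
    have hrow : PySem.List.pyGetD X u [] = X[u.toNat] := by
      rw [PySem.List.pyGetD_eq_getElem X [] hu0 hulen]
    have hmemrow : X[u.toNat] ∈ X := List.getElem_mem (by omega)
    have hrlen : X[u.toNat].length = N' := h2 _ hmemrow
    have hvlen : v < (X[u.toNat].length : Int) := by rw [hrlen]; omega
    rw [hrow, pvSet_inrange _ _ _ hv0 hvlen, pvSet_inrange _ _ _ hu0 hulen]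
    refine ⟨by simp [h1], ?_, ?_⟩
    · intro r hr
      rcases List.mem_or_eq_of_mem_set hr with hr' | rfl
      · exact h2 r hr'
      · simp [hrlen]
    · intro r hr x hx
      rcases List.mem_or_eq_of_mem_set hr with hr' | rfl
      · exact h3 r hr' x hx
      · rcases List.mem_or_eq_of_mem_set hx with hx' | rfl
        · exact h3 _ hmemrow x hx'
        · right; rfl
  have hgood : P (pvBuildAdj grid n m (n*m) s) := by
    rw [pvBuildAdj, ← hNm, Int.toNat_natCast]
    apply pvFoldlInv P
    · exact ⟨by simp, fun r hr => by simp [List.eq_of_mem_replicate hr],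
        fun r hr x hx => by left; simpa using
          List.eq_of_mem_replicate (List.eq_of_mem_replicate hr ▸ hx)⟩
    · intro A y hy hA
      apply pvFoldlInv P
      · exact hA
      · intro A' x hx hA'
        apply pvFoldlInv P
        · exact hA'
        · intro A'' dd hdd hA''
          have hy' : 0 ≤ y ∧ y < n := by
            have := PySem.List.mem_pyRange_one.mp hy; omega
          have hx' : 0 ≤ x ∧ x < m := by
            have := PySem.List.mem_pyRange_one.mp hx; omega
          by_cases hg : 0 ≤ y + dd.1 ∧ y + dd.1 < n ∧ 0 ≤ x + dd.2 ∧ x + dd.2 < m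
          · rw [if_pos hg]
            by_cases hd : pvCell grid (y + dd.1) (x + dd.2) - pvCell grid y x = s
            · simp only [hd, if_true]
              apply hset
              · exact add_nonneg (mul_nonneg hy'.1 hm) hx'.1
              · calc y * m + x < y * m + m := by omega
                  _ = (y + 1) * m := by ring
                  _ ≤ n * m := by
                    apply mul_le_mul_of_nonneg_right (by omega) hm
              · exact add_nonneg (mul_nonneg hg.1 hm) hg.2.2.1
              · calc (y + dd.1) * m + (x + dd.2) < (y + dd.1) * m + m := by omega
                  _ = (y + dd.1 + 1) * m := by ring
                  _ ≤ n * m := by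
                    apply mul_le_mul_of_nonneg_right (by omega) hm
              · exact hA''
            · simpa [hd] using hA''
          · simpa [hg] using hA''
  exact ⟨hgood.1, hgood.2.1, fun r hr x hx => by
    rcases hgood.2.2 r hr x hx with rfl | rfl <;> norm_num [pvMOD]⟩
lemma pvFoldSum : ∀ (rows : List (List Int)) (a : Int),
    rows.foldl (fun ans row => PySem.Int.mod (ans + row.sum) pvMOD) a
      = if rows.isEmpty then a
        else (a + ((rows.map (fun r => r.sum)).sum)) % pvMOD := by
  intro rows
  induction rows with
  | nil => intro a; simp
  | cons r rs ih =>
    intro a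
    simp only [List.foldl_cons, List.isEmpty_cons, Bool.false_eq_true, if_false,
      List.map_cons, List.sum_cons]
    rw [ih, PySem.Int.mod_eq_emod_of_pos pvMOD_pos]
    cases rs with
    | nil => simp
    | cons r2 rs2 =>
      simp only [List.isEmpty_cons, Bool.false_eq_true, if_false]
      rw [Int.emod_add_emod]
      ring_nf
theorem pvMain (grid : List (List Int)) (d : List Int) (k : Int) :
    solution grid d k = solution_alt grid d k := by
  simp only [solution, solution_alt, pvMatMul_eq]
  set nI : Int := PySem.List.len grid with hnI
  set mI : Int := PySem.List.len (PySem.List.pyGetD grid 0 []) with hmI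
  have hn : 0 ≤ nI := by simp [hnI, PySem.List.len_eq]
  have hm : 0 ≤ mI := by simp [hmI, PySem.List.len_eq]
  set N' : Nat := (nI * mI).toNat with hN'
  set M0 := pvBuildAdj grid nI mI (nI*mI) (PySem.List.pyGetD d 0 0) with hM0
  set Mc := (PySem.List.pyRange 1 (PySem.List.len d) 1).foldl
      (fun M t => pvMatMulB M (pvBuildAdj grid nI mI (nI*mI) (PySem.List.pyGetD d t 0)))
      M0 with hMc
  have hgood0 : pvGood N' M0 := pvGood_buildAdj grid nI mI hn hm _
  have hgood : pvGood N' Mc := by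
    rw [hMc]
    apply pvFoldlInv _ _ _ _ hgood0
    intro a t _ ha
    exact pvGood_matMulB N' _ _ ha.1
  rw [pvMatPow_eq Mc hgood k, pvPowRec_eq k.toNat k Nat.le.refl Mc hgood]
  rw [pvFoldSum]
  by_cases hE : (pvNpow Mc k.toNat).isEmpty
  · rw [if_pos hE, List.isEmpty_iff.mp hE]
    simp [PySem.Int.mod_eq_emod_of_pos pvMOD_pos]
  · rw [if_neg hE, PySem.Int.mod_eq_emod_of_pos pvMOD_pos, zero_add]

-- ===== VERDICT (by name: the statement is the Claim_ definition above) =====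
theorem solution_spec : Claim_equal_solution := by
  intro grid d k _ _
  unfold Spec_solution
  exact pvMain grid d k
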